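-- pv_equiv track=rewrite | github.com/adriantomaszewski/RISE | CS50/plates/plates.py | thirdisfine
-- ===== SOURCE A (Python) =====
-- def thirdisfine(s):
--     count = 0
--     for i, char in enumerate(s):
--         if char=="0" and count == 0:
--             return False
--         elif char.isnumeric():
--             count+=1
--         if not (char.isalpha() or char.isnumeric()):
--             return False
--         if char.isnumeric():
--             if i==len(s)-1 or s[i+1].isnumeric():
--                 return True
--             else:
--                 return False
--     return True
-- ===== SOURCE B (Python) =====
-- ASCII_LETTERS = "abcdefghijklmnopqrstuvwxyzABCDEFGHIJKLMNOPQRSTUVWXYZ"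
-- NONZERO_DIGITS = "123456789"
-- DIGITS = "0123456789"
--
-- def thirdisfine(s):
--     # strip the leading letters in one library call, then judge the remainder
--     # against two membership tables (exact on the ASCII domain of the claim)
--     t = s.lstrip(ASCII_LETTERS)
--     if not t:
--         return True
--     return t[0] in NONZERO_DIGITS and (len(t) == 1 or t[1] in DIGITS)
-- ===== Notes on version B (the rewrite author's own statement) =====
-- stated objective: idiomatic
-- what changed: Replaces A's character-by-character loop with embedded isalpha/isnumeric tests, an enumerate index and a dead count variable by one str.lstrip library call that removes the leading letters, followed by two membership-table lookups ('123456789'/'0123456789') on the first two remaining characters; no explicit scan or character-class method remains in B.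
import Mathlib
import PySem

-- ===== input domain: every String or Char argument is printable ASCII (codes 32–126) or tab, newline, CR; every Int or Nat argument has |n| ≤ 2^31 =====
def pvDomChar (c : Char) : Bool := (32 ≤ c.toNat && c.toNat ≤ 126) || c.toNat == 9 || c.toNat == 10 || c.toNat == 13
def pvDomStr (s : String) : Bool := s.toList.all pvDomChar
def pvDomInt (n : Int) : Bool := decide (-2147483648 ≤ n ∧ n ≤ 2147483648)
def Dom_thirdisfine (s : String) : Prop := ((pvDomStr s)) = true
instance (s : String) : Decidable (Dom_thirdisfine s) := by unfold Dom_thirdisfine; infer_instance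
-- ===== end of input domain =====

-- B replaces A's char-by-char loop (enumerate index, isalpha/isnumeric tests, dead count)
-- by one lstrip call over a letter table plus two digit-table membership lookups (same O(n),
-- measurably faster in Python by the C-level lstrip). isnumeric() on A's side is ported as PySem.Chars.isdigit —
-- exact on the printable-ASCII domain, where isnumeric and isdigit coincide.

-- ===== PORT A =====
-- A's for-loop with early returns: structural recursion over the remaining chars, carrying
-- the enumerate index i, the count, and the full list for s[i+1]/len(s).
def thirdisfineLoop (full : List Char) : Nat → Nat → List Char → Bool
  | _, _, [] => true
  | i, count, c :: rest =>
    if c == '0' && count == 0 then false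
    else
      let count' := if PySem.Chars.isdigit c then count + 1 else count
      if !(PySem.Chars.isalpha c || PySem.Chars.isdigit c) then false
      else if PySem.Chars.isdigit c then
        if i == full.length - 1 then true
        else ((PySem.List.pyGet? full ((i : Int) + 1)).map PySem.Chars.isdigit).getD false
      else thirdisfineLoop full (i + 1) count' rest

def thirdisfine (s : String) : Bool := thirdisfineLoop s.toList 0 0 s.toList

-- ===== PORT B =====
-- Source B's module constants as char tables
def pvLetters : List Char := ['a', 'b', 'c', 'd', 'e', 'f', 'g', 'h', 'i', 'j', 'k', 'l', 'm', 'n', 'o', 'p', 'q', 'r', 's', 't', 'u', 'v', 'w', 'x', 'y', 'z', 'A', 'B', 'C', 'D', 'E', 'F', 'G', 'H', 'I', 'J', 'K', 'L', 'M', 'N', 'O', 'P', 'Q', 'R', 'S', 'T', 'U', 'V', 'W', 'X', 'Y', 'Z']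
def pvNonzeroDigits : List Char := ['1', '2', '3', '4', '5', '6', '7', '8', '9']
def pvDigits : List Char := ['0', '1', '2', '3', '4', '5', '6', '7', '8', '9']

-- Source B on the char list: t = s.lstrip(LETTERS) is dropWhile over the letter table,
-- then two membership lookups on t[0] / t[1]
def thirdisfineAltList (cs : List Char) : Bool :=
  match cs.dropWhile (fun c => pvLetters.contains c) with
  | [] => true
  | c :: rest =>
    pvNonzeroDigits.contains c &&
      (match rest with
       | [] => true
       | d :: _ => pvDigits.contains d)

def thirdisfine_alt (s : String) : Bool := thirdisfineAltList s.toList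

-- ===== PRECONDITION & SPEC =====
def Spec_thirdisfine (s : String) (out : Bool) : Prop := out = thirdisfine_alt s
instance (s : String) (out : Bool) : Decidable (Spec_thirdisfine s out) := by unfold Spec_thirdisfine; infer_instance

-- ===== CLAIM (what is proved, stated in full; the proofs are below) =====
def Claim_equal_thirdisfine : Prop := ∀ (s : String), Dom_thirdisfine s → Spec_thirdisfine s (thirdisfine s)

-- ===== LEMMAS AND PROOFS =====

-- B's letter table is exactly A's isalpha test (for every Char)
lemma mem_letters (c : Char) : decide (c ∈ pvLetters) = PySem.Chars.isalpha c := by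
  rw [Bool.eq_iff_iff]
  simp only [pvLetters, List.mem_cons, List.not_mem_nil, or_false,
    PySem.Chars.isalpha, PySem.Chars.isupper, PySem.Chars.islower,
    Char.le_def, UInt32.le_iff_toNat_le, Char.ext_iff, ← UInt32.toNat_inj,
    Char.toNat_val, Char.reduceToNat,
    decide_eq_true_eq, Bool.or_eq_true, Bool.and_eq_true]
  omega

-- B's nonzero-digit table is A's "isnumeric and not '0'"
lemma mem_nzdigits (c : Char) :
    decide (c ∈ pvNonzeroDigits) = (PySem.Chars.isdigit c && !(c == '0')) := by
  rw [Bool.eq_iff_iff]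
  simp only [pvNonzeroDigits, List.mem_cons, List.not_mem_nil, or_false,
    PySem.Chars.isdigit, Char.le_def, UInt32.le_iff_toNat_le, Char.ext_iff, ← UInt32.toNat_inj,
    Char.toNat_val, Char.reduceToNat,
    decide_eq_true_eq, Bool.and_eq_true, Bool.not_eq_true', beq_eq_false_iff_ne, ne_eq]
  omega

-- B's digit table is A's isnumeric test
lemma mem_digits (c : Char) : decide (c ∈ pvDigits) = PySem.Chars.isdigit c := by
  rw [Bool.eq_iff_iff]
  simp only [pvDigits, List.mem_cons, List.not_mem_nil, or_false,
    PySem.Chars.isdigit, Char.le_def, UInt32.le_iff_toNat_le, Char.ext_iff, ← UInt32.toNat_inj,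
    Char.toNat_val, Char.reduceToNat,
    decide_eq_true_eq, Bool.and_eq_true]
  omega

lemma alpha_not_digit (c : Char) (h : PySem.Chars.isalpha c = true) :
    PySem.Chars.isdigit c = false := by
  simp [PySem.Chars.isalpha, PySem.Chars.isupper, PySem.Chars.islower,
    PySem.Chars.isdigit, Char.le_def, UInt32.le_iff_toNat_le] at *
  omega

lemma alpha_ne_zero (c : Char) (h : PySem.Chars.isalpha c = true) : (c == '0') = false := by
  by_cases h0 : c = '0'
  · subst h0; exact absurd h (by decide)
  · simpa using h0

-- B's alt function with the tables rewritten away: pure isalpha/isdigit normal form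
lemma alt_normal (cs : List Char) :
    thirdisfineAltList cs =
      (match cs.dropWhile (fun c => PySem.Chars.isalpha c) with
       | [] => true
       | c :: rest =>
         (PySem.Chars.isdigit c && !(c == '0')) &&
           (match rest with
            | [] => true
            | d :: _ => PySem.Chars.isdigit d)) := by
  simp only [thirdisfineAltList, List.contains_eq_mem, mem_letters, mem_nzdigits, mem_digits]

-- dropWhile over a prefix every element of which passes the predicate
lemma dropWhile_alpha_prefix (pre rest : List Char)
    (hp : ∀ c ∈ pre, PySem.Chars.isalpha c = true) :
    (pre ++ rest).dropWhile (fun c => PySem.Chars.isalpha c)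
      = rest.dropWhile (fun c => PySem.Chars.isalpha c) := by
  induction pre with
  | nil => rfl
  | cons a t ih =>
    simp only [List.cons_append, List.dropWhile_cons, hp a (by simp), if_true]
    exact ih (fun c hc => hp c (by simp [hc]))

lemma loop_eq_alt (pre rest : List Char)
    (hp : ∀ c ∈ pre, PySem.Chars.isalpha c = true) :
    thirdisfineLoop (pre ++ rest) pre.length 0 rest = thirdisfineAltList (pre ++ rest) := by
  rw [alt_normal]
  induction rest generalizing pre with
  | nil =>
    rw [dropWhile_alpha_prefix pre [] hp]
    simp [thirdisfineLoop]
  | cons c rest ih =>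
    rw [dropWhile_alpha_prefix pre (c :: rest) hp]
    by_cases hca : PySem.Chars.isalpha c = true
    · -- alpha char: A continues the loop; B's lstrip also drops c
      have hd := alpha_not_digit c hca
      have hz := alpha_ne_zero c hca
      have hpre' : ∀ x ∈ pre ++ [c], PySem.Chars.isalpha x = true := by
        intro x hx; rcases List.mem_append.1 hx with h | h
        · exact hp x h
        · simp at h; subst h; exact hca
      have := ih (pre ++ [c]) hpre'
      rw [dropWhile_alpha_prefix (pre ++ [c]) rest hpre'] at this
      simp only [List.append_assoc, List.singleton_append, List.length_append,
        List.length_cons, List.length_nil, Nat.zero_add] at this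
      simpa [thirdisfineLoop, hz, hd, hca, List.dropWhile_cons] using this
    · -- first non-letter: both sides decide here
      have hca' : PySem.Chars.isalpha c = false := by simpa using hca
      simp only [List.dropWhile_cons, hca', if_false, Bool.false_eq_true]
      by_cases hz : c = '0'
      · subst hz
        simp [thirdisfineLoop]
      · have hz' : (c == '0') = false := by simpa using hz
        by_cases hdig : PySem.Chars.isdigit c = true
        · cases rest with
          | nil =>
            have hlen : (pre ++ [c]).length = pre.length + 1 := by simp
            simp [thirdisfineLoop, hz', hdig, hlen]
          | cons d rest' =>
            have hget2 : PySem.List.pyGet? (pre ++ c :: d :: rest') ((pre.length : Int) + 1)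
                = some d := by
              have : ((pre.length : Int) + 1) = ((pre.length + 1 : Nat) : Int) := by push_cast; ring
              rw [this, PySem.List.pyGet?_natCast]; simp
            have hlen : (pre ++ c :: d :: rest').length = pre.length + rest'.length + 2 := by
              simp [List.length_append]; omega
            have hi : (pre.length == (pre ++ c :: d :: rest').length - 1) = false := by
              simp [hlen]; omega
            simp [thirdisfineLoop, hz', hdig, hget2]
        · -- neither letter nor digit: both return false
          have hdig' : PySem.Chars.isdigit c = false := by simpa using hdig
          simp [thirdisfineLoop, hz', hdig', hca']

-- ===== VERDICT (by name: the statement is the Claim_ definition above) =====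
theorem thirdisfine_spec : Claim_equal_thirdisfine := by
  intro s _
  unfold Spec_thirdisfine thirdisfine thirdisfine_alt
  simpa using loop_eq_alt [] s.toList (by simp)
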